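-- pv_equiv track=rewrite | github.com/MrBrantCode/unitest_baseline | mut_generate/mist_train_taco/taco_17432/solution.py | calculate_alice_score
-- ===== SOURCE A (Python) =====
-- def calculate_alice_score(s: str) -> int:
--     n = len(s)
--     count = [0] * n
--     poss = []
--     ans = 0
--
--     # Initialize the count array
--     if s[0] == '0':
--         count[0] = 0
--     else:
--         count[0] = 1
--
--     # Fill the count array
--     for i in range(1, n):
--         if s[i] == '1':
--             count[i] = 1 + count[i - 1]
--
--     # Collect possible scores
--     for i in range(n - 1):
--         if count[i] != count[i + 1] - 1:
--             poss.append(count[i])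
--     if count[n - 1] != 0:
--         poss.append(count[n - 1])
--
--     # Sort possible scores in descending order
--     poss.sort(reverse=True)
--
--     # Calculate Alice's score
--     i = 0
--     while i < len(poss):
--         ans += poss[i]
--         i += 2
--
--     return ans
-- ===== SOURCE B (Python) =====
-- def calculate_alice_score(s: str) -> int:
--     n = len(s)
--     # one scan building a histogram of run lengths (counting sort on values <= n)
--     buckets = [0] * (n + 1)
--     cur = 0 if s[0] == '0' else 1
--     for c in s[1:]:
--         if c == '1':
--             cur += 1
--         else:
--             buckets[cur] += 1
--             cur = 0
--     buckets[cur] += 1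
--     # alternating pick from the longest run down, whole buckets at a time
--     ans = 0
--     parity = 0  # 0: the next run goes to Alice
--     for length in range(n, 0, -1):
--         c = buckets[length]
--         ans += length * ((c + 1 - parity) // 2)
--         parity = (parity + c) % 2
--     return ans
-- ===== Notes on version B (the rewrite author's own statement) =====
-- stated objective: alternative
-- what changed: Replaces A's prefix-count array + adjacent-pair scan + comparison sort + every-other-index while loop by a single scan that builds a run-length histogram (counting sort on values <= n) and then takes whole buckets from the longest length down with a closed-form alternating pick; Pre_ excludes only the empty string, on which both implementations raise IndexError at s[0].
import Mathlib
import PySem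

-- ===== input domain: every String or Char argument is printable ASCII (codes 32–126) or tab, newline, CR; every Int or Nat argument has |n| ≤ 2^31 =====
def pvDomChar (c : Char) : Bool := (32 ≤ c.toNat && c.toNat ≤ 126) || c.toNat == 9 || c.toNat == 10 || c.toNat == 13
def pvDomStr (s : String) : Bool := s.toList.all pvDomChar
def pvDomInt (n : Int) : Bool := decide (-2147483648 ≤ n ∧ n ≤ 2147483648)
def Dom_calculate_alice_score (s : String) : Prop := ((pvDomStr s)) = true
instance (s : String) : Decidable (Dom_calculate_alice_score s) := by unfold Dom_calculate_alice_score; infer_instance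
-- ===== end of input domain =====

-- B replaces A's prefix-count array + comparison sort + every-other-index loop by a
-- run-length histogram (counting sort) dispensed from the longest length down (alternative algorithm).

-- ===== PORT A =====
-- count[i] = 1 + count[i-1] if s[i]=='1' else 0  (the filled count array, positions 1..n-1)
def pvA_count : Int → List Char → List Int
  | _, [] => []
  | prev, c :: r =>
    if c = '1' then (1 + prev) :: pvA_count (1 + prev) r
    else (0 : Int) :: pvA_count 0 r

-- the 'poss' collection loop: adjacent comparison, then the last element if nonzero
def pvA_poss : List Int → List Int
  | [] => []
  | [a] => if a ≠ 0 then [a] else []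
  | a :: b :: r => (if a ≠ b - 1 then [a] else []) ++ pvA_poss (b :: r)

-- while i < len(poss): ans += poss[i]; i += 2
def pvA_evenSum : List Int → Int
  | [] => 0
  | [a] => a
  | a :: _ :: r => a + pvA_evenSum r

def calculate_alice_score (s : String) : Int :=
  match s.toList with
  | [] => 0  -- Python raises IndexError on s[0]; excluded by Pre_
  | c0 :: rest =>
    let first : Int := if c0 = '0' then 0 else 1
    let count : List Int := first :: pvA_count first rest
    let poss := pvA_poss count
    pvA_evenSum (PySem.List.sorted poss (fun x => x) true)

-- ===== PORT B =====
def calculate_alice_score_alt (s : String) : Int :=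
  match s.toList with
  | [] => 0  -- Python raises IndexError on s[0]; excluded by Pre_
  | c0 :: rest =>
    let n : Int := ((c0 :: rest).length : Int)
    -- one scan building the run-length histogram (cur is a nonnegative counter, so .toNat is exact)
    let st := rest.foldl
      (fun (st : List Int × Int) c =>
        if c = '1' then (st.1, st.2 + 1)
        else (st.1.modify st.2.toNat (· + 1), 0))
      (List.replicate (n.toNat + 1) 0, if c0 = '0' then 0 else 1)
    let buckets := st.1.modify st.2.toNat (· + 1)
    -- alternating pick, whole buckets at a time, longest first
    let fin := (PySem.List.pyRange n 0 (-1)).foldl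
      (fun (ap : Int × Int) len =>
        let c := PySem.List.pyGetD buckets len 0
        (ap.1 + len * PySem.Int.floordiv (c + 1 - ap.2) 2, PySem.Int.mod (ap.2 + c) 2))
      (0, 0)
    fin.1

-- ===== PRECONDITION & SPEC =====
-- On the empty string both A and B raise IndexError (s[0]); that is the only excluded input.
def Pre_calculate_alice_score (s : String) : Prop := s.toList ≠ []
instance (s : String) : Decidable (Pre_calculate_alice_score s) := by
  unfold Pre_calculate_alice_score; infer_instance
def pvWitness_calculate_alice_score : String := "0110100111"

def Spec_calculate_alice_score (s : String) (out : Int) : Prop := out = calculate_alice_score_alt s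
instance (s : String) (out : Int) : Decidable (Spec_calculate_alice_score s out) := by
  unfold Spec_calculate_alice_score; infer_instance

-- ===== CLAIM (what is proved, stated in full; the proofs are below) =====
def Claim_equal_calculate_alice_score : Prop := ∀ (s : String), Dom_calculate_alice_score s → Pre_calculate_alice_score s → Spec_calculate_alice_score s (calculate_alice_score s)

-- ===== LEMMAS AND PROOFS =====

def pvRunsAux (cur : Int) : List Char → List Int
  | [] => [cur]
  | c :: r => if c = '1' then pvRunsAux (cur + 1) r else cur :: pvRunsAux 0 r

def pvStripLast : List Int → List Int
  | [] => []
  | [a] => if a ≠ 0 then [a] else []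
  | a :: b :: r => a :: pvStripLast (b :: r)

lemma pvRunsAux_ne_nil (r : List Char) (cur : Int) : pvRunsAux cur r ≠ [] := by
  induction r generalizing cur with
  | nil => simp [pvRunsAux]
  | cons c r ih =>
    simp only [pvRunsAux]
    split
    · exact ih _
    · simp

lemma pvA_poss_eq_strip (r : List Char) (prev : Int) (h : 0 ≤ prev) :
    pvA_poss (prev :: pvA_count prev r) = pvStripLast (pvRunsAux prev r) := by
  induction r generalizing prev with
  | nil => simp [pvA_count, pvA_poss, pvRunsAux, pvStripLast]
  | cons c r ih =>
    by_cases hc : c = '1'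
    · have h1 : 1 + prev = prev + 1 := by ring
      simp only [pvA_count, pvRunsAux, hc, if_pos rfl, if_true, pvA_poss, h1]
      rw [ih (prev + 1) (by omega)]
      simp
    · obtain ⟨x, xs, hx⟩ := List.exists_cons_of_ne_nil (pvRunsAux_ne_nil r 0)
      simp only [pvA_count, pvRunsAux, hc, if_neg hc, if_false, pvA_poss]
      rw [ih 0 le_rfl, hx]
      simp only [pvStripLast]
      have : prev ≠ (-1:Int) := by omega
      simp [this]

lemma pvRunsAux_bounds (r : List Char) (cur : Int) (h : 0 ≤ cur) :
    ∀ v ∈ pvRunsAux cur r, 0 ≤ v ∧ v ≤ cur + r.length := by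
  induction r generalizing cur with
  | nil => simp [pvRunsAux]; omega
  | cons c r ih =>
    simp only [pvRunsAux, List.length_cons]
    split
    · intro v hv
      have := ih (cur + 1) (by omega) v hv
      omega
    · intro v hv
      rcases List.mem_cons.1 hv with rfl | hv
      · omega
      · have := ih 0 le_rfl v hv
        omega

def pvScan : List Int × Int → List Char → List Int × Int
  | st, [] => st
  | st, c :: r =>
    if c = '1' then pvScan (st.1, st.2 + 1) r
    else pvScan (st.1.modify st.2.toNat (· + 1), 0) r

def pvHisto (b : List Int) (e : List Int) : List Int :=
  e.foldl (fun b v => b.modify v.toNat (· + 1)) b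

lemma pvScan_histo (r : List Char) (b : List Int) (cur : Int) :
    (let st := pvScan (b, cur) r; st.1.modify st.2.toNat (· + 1)) = pvHisto b (pvRunsAux cur r) := by
  induction r generalizing b cur with
  | nil => simp [pvScan, pvRunsAux, pvHisto]
  | cons c r ih =>
    simp only [pvScan, pvRunsAux]
    split
    · exact ih b (cur + 1)
    · simpa [pvHisto] using ih (b.modify cur.toNat (· + 1)) 0

lemma pvFold_eq_scan (r : List Char) (st : List Int × Int) :
    r.foldl
      (fun (st : List Int × Int) c =>
        if c = '1' then (st.1, st.2 + 1)
        else (st.1.modify st.2.toNat (· + 1), 0)) st = pvScan st r := by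
  induction r generalizing st with
  | nil => simp [pvScan]
  | cons c r ih =>
    rw [List.foldl_cons]
    by_cases hc : c = '1'
    · simp only [pvScan, if_pos hc]; exact ih _
    · simp only [pvScan, if_neg hc]; exact ih _

lemma pvGetD_modify (l : List Int) (i j : Nat) (hj : j < l.length) :
    (l.modify i (· + 1)).getD j 0 = if i = j then l.getD j 0 + 1 else l.getD j 0 := by
  simp [List.getD_eq_getElem?_getD, List.getElem?_modify, List.getElem?_eq_getElem hj]

lemma pvHisto_getD (e : List Int) (b : List Int) (L : Nat)
    (he : ∀ v ∈ e, 0 ≤ v ∧ v.toNat < b.length) (hL : L < b.length) :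
    (pvHisto b e).getD L 0 = b.getD L 0 + (e.count (L : Int) : Int) := by
  induction e generalizing b with
  | nil => simp [pvHisto]
  | cons v e ih =>
    have hv := he v (by simp)
    have hrec := ih (b.modify v.toNat (· + 1))
      (fun w hw => by simpa [List.length_modify] using he w (List.mem_cons_of_mem _ hw))
      (by simpa [List.length_modify] using hL)
    simp only [pvHisto, List.foldl_cons] at *
    rw [hrec, pvGetD_modify _ _ _ hL, List.count_cons]
    by_cases hvL : v = (L : Int)
    · have : v.toNat = L := by omega
      simp [hvL, this]
      push_cast
      ring
    · have : ¬ (v.toNat = L) := by omega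
      simp [hvL, this]

def pvOddSum : List Int → Int
  | [] => 0
  | _ :: r => pvA_evenSum r

def pvAlt : Bool → List Int → Int
  | _, [] => 0
  | p, x :: r => (if p then x else 0) + pvAlt (!p) r

lemma pvA_evenSum_cons (x : Int) (r : List Int) : pvA_evenSum (x :: r) = x + pvOddSum r := by
  cases r <;> simp [pvA_evenSum, pvOddSum]

lemma pvAlt_eq_sums (l : List Int) :
    pvAlt true l = pvA_evenSum l ∧ pvAlt false l = pvOddSum l := by
  induction l with
  | nil => simp [pvAlt, pvA_evenSum, pvOddSum]
  | cons x r ih =>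
    constructor
    · rw [pvA_evenSum_cons]; simp [pvAlt, ih.2]
    · simp [pvAlt, pvOddSum, ih.1]

lemma pvAlt_zeros (t : List Int) (ht : ∀ x ∈ t, x = 0) (p : Bool) : pvAlt p t = 0 := by
  induction t generalizing p with
  | nil => simp [pvAlt]
  | cons x r ih =>
    have hx := ht x (by simp)
    simp [pvAlt, hx, ih (fun y hy => ht y (List.mem_cons_of_mem _ hy))]

lemma pvAlt_append_zeros (l t : List Int) (ht : ∀ x ∈ t, x = 0) (p : Bool) :
    pvAlt p (l ++ t) = pvAlt p l := by
  induction l generalizing p with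
  | nil => simpa [pvAlt] using pvAlt_zeros t ht p
  | cons x r ih => simp [pvAlt, ih]

lemma pvAlt_append (l t : List Int) (p : Bool) :
    pvAlt p (l ++ t) = pvAlt p l + pvAlt (if l.length % 2 = 0 then p else !p) t := by
  induction l generalizing p with
  | nil => simp [pvAlt]
  | cons x r ih =>
    simp only [List.cons_append, pvAlt, ih (!p), List.length_cons]
    have h : (r.length + 1) % 2 = 0 ↔ ¬ (r.length % 2 = 0) := by omega
    by_cases hr : r.length % 2 = 0
    · simp [hr, h]
      ring
    · have : (r.length + 1) % 2 = 0 := by omega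
      simp [hr, this]
      ring

lemma pvAlt_replicate (k : Nat) (L : Int) (p : Bool) :
    pvAlt p (List.replicate k L) = L * (((k : Int) + (if p then 1 else 0)) / 2) := by
  induction k generalizing p with
  | zero => cases p <;> simp [pvAlt]
  | succ k ih =>
    rw [List.replicate_succ]
    simp only [pvAlt, ih (!p)]
    cases p
    · norm_num
    · have h2 : (((k:Int) + 1) + 1) / 2 = (k : Int) / 2 + 1 := by omega
      simp only [if_true, Bool.not_true, Bool.false_eq_true, if_false, add_zero, push_cast]
      norm_num [h2]
      ring

lemma pvFoldDesc (cnt : Int → Int) (Ls : List Int) (hc : ∀ L ∈ Ls, 0 ≤ cnt L)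
    (a : Int) (p : Bool) :
    (Ls.foldl (fun (ap : Int × Int) len =>
        (ap.1 + len * PySem.Int.floordiv (cnt len + 1 - ap.2) 2, PySem.Int.mod (ap.2 + cnt len) 2))
      (a, if p then 0 else 1)).1
    = a + pvAlt p (Ls.flatMap (fun L => List.replicate (cnt L).toNat L)) := by
  induction Ls generalizing a p with
  | nil => simp [pvAlt]
  | cons L Ls ih =>
    have hL : 0 ≤ cnt L := hc L (by simp)
    have hrest : ∀ M ∈ Ls, 0 ≤ cnt M := fun M hM => hc M (List.mem_cons_of_mem _ hM)
    rw [List.foldl_cons, List.flatMap_cons, pvAlt_append]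
    set c := cnt L with hceq
    have hmod : PySem.Int.mod ((if p then 0 else 1) + c) 2
        = if (if (List.replicate c.toNat L).length % 2 = 0 then p else !p) then 0 else 1 := by
      rw [PySem.Int.mod_eq_emod_of_pos (by norm_num : (0:Int) < 2)]
      rw [List.length_replicate]
      have hct : ((c.toNat : Int)) = c := Int.toNat_of_nonneg hL
      cases p <;> simp only [Bool.not_true, Bool.not_false] <;> split_ifs <;> first | omega | (exfalso; omega) | (apply absurd rfl; assumption) | simp
    have hdiv : L * PySem.Int.floordiv (c + 1 - (if p then 0 else 1)) 2
        = pvAlt p (List.replicate c.toNat L) := by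
      rw [PySem.Int.floordiv_eq_ediv_of_pos (by norm_num : (0:Int) < 2), pvAlt_replicate]
      have hct : ((c.toNat : Int)) = c := Int.toNat_of_nonneg hL
      rw [hct]
      cases p
      · norm_num
      · norm_num
    rw [hmod] at *
    rw [ih hrest _ _]
    rw [hdiv]
    ring

lemma pvStripLast_count (l : List Int) (v : Int) (hv : v ≠ 0) :
    (pvStripLast l).count v = l.count v := by
  induction l with
  | nil => simp [pvStripLast]
  | cons a t ih =>
    cases t with
    | nil =>
      by_cases ha : a = 0
      · simp [pvStripLast, ha, hv, Ne.symm hv]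
      · simp [pvStripLast, ha]
    | cons b t' =>
      simp [pvStripLast, List.count_cons, ih]

lemma pvFlatMap_count (cnt : Int → Int) (Ls : List Int) (hnd : Ls.Nodup) (v : Int) :
    (Ls.flatMap (fun L => List.replicate (cnt L).toNat L)).count v
      = if v ∈ Ls then (cnt v).toNat else 0 := by
  induction Ls with
  | nil => simp
  | cons L Ls ih =>
    simp only [List.flatMap_cons, List.count_append, List.nodup_cons] at *
    rw [ih hnd.2, List.count_replicate]
    by_cases hvL : v = L
    · subst hvL
      simp [hnd.1]
    · simp [hvL, Ne.symm hvL]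

lemma pvFlatMap_pairwise (cnt : Int → Int) (Ls : List Int) (hLs : Ls.Pairwise (· > ·)) :
    (Ls.flatMap (fun L => List.replicate (cnt L).toNat L)).Pairwise (· ≥ ·) := by
  induction Ls with
  | nil => simp
  | cons L Ls ih =>
    simp only [List.flatMap_cons, List.pairwise_cons] at hLs ⊢
    rw [List.pairwise_append]
    refine ⟨?_, ih hLs.2, ?_⟩
    · rw [List.pairwise_replicate]
      right; exact le_refl L
    · intro x hx y hy
      have hxL : x = L := List.eq_of_mem_replicate hx
      obtain ⟨M, hM, hyM⟩ := List.mem_flatMap.1 hy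
      have hyM' : y = M := List.eq_of_mem_replicate hyM
      subst hxL; subst hyM'
      exact le_of_lt (hLs.1 _ hM)

lemma pvRangeDesc_pairwise (n : Int) : (PySem.List.pyRange n 0 (-1)).Pairwise (· > ·) := by
  rw [PySem.List.pyRange_neg_one_eq_reverse, List.pairwise_reverse]
  simpa [gt_iff_lt] using PySem.List.pairwise_lt_pyRange_one (0+1) (n+1)

lemma pvAssemble (e b1 : List Int) (n : Int)
    (hlen : b1.length = n.toNat + 1)
    (hzero : ∀ j : Nat, 0 < j → j < b1.length → b1.getD j 0 = 0)
    (hbound : ∀ v ∈ e, 0 ≤ v ∧ v ≤ n) :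
    pvA_evenSum (PySem.List.sorted (pvStripLast e) (fun x => x) true)
      = ((PySem.List.pyRange n 0 (-1)).foldl
          (fun (ap : Int × Int) len =>
            (ap.1 + len * PySem.Int.floordiv (PySem.List.pyGetD (pvHisto b1 e) len 0 + 1 - ap.2) 2,
             PySem.Int.mod (ap.2 + PySem.List.pyGetD (pvHisto b1 e) len 0) 2)) ((0:Int), (0:Int))).1 := by
  have hbound' : ∀ v ∈ e, 0 ≤ v ∧ v.toNat < b1.length := by
    intro v hv
    have hb := hbound v hv
    refine ⟨hb.1, ?_⟩
    rw [hlen]; omega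
  have hmem : ∀ L : Int, L ∈ PySem.List.pyRange n 0 (-1) ↔ 0 < L ∧ L ≤ n := by
    intro L
    rw [PySem.List.mem_pyRange_neg_one]
  have hcnt : ∀ v : Int, 0 < v → v ≤ n →
      PySem.List.pyGetD (pvHisto b1 e) v 0 = (e.count v : Int) := by
    intro v h1 h2
    have h0 : (0:Int) ≤ v := le_of_lt h1
    have hv : v = ((v.toNat : Nat) : Int) := (Int.toNat_of_nonneg h0).symm
    rw [hv, PySem.List.pyGetD_natCast]
    rw [pvHisto_getD e b1 v.toNat hbound' (by rw [hlen]; omega)]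
    rw [hzero v.toNat (by omega) (by rw [hlen]; omega), ← hv, zero_add]
  have hcntnn : ∀ L ∈ PySem.List.pyRange n 0 (-1),
      0 ≤ PySem.List.pyGetD (pvHisto b1 e) L 0 := by
    intro L hL
    have hb := (hmem L).1 hL
    rw [hcnt L hb.1 hb.2]
    positivity
  have hnd : (PySem.List.pyRange n 0 (-1)).Nodup :=
    (pvRangeDesc_pairwise n).imp (fun h => ne_of_gt h)
  have hcount := pvFlatMap_count (fun L => PySem.List.pyGetD (pvHisto b1 e) L 0)
    (PySem.List.pyRange n 0 (-1)) hnd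
  beta_reduce at hcount
  have hperm : ((PySem.List.pyRange n 0 (-1)).flatMap
        (fun L => List.replicate (PySem.List.pyGetD (pvHisto b1 e) L 0).toNat L)
      ++ List.replicate ((pvStripLast e).count 0) 0).Perm (pvStripLast e) := by
    rw [List.perm_iff_count]
    intro v
    rw [List.count_append, List.count_replicate, hcount v]
    by_cases hv0 : v = 0
    · subst hv0
      have h0m : (0:Int) ∉ PySem.List.pyRange n 0 (-1) := fun hc => by
        have := (hmem 0).1 hc; omega
      simp [h0m]
    · have hbeq : ((0:Int) == v) = false := by simp [Ne.symm hv0]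
      rw [pvStripLast_count e v hv0]
      by_cases hvL : v ∈ PySem.List.pyRange n 0 (-1)
      · have hb := (hmem v).1 hvL
        simp only [hbeq, Bool.false_eq_true, if_false, add_zero, if_pos hvL,
          hcnt v hb.1 hb.2]
        simp
      · simp only [hbeq, Bool.false_eq_true, if_false, add_zero, if_neg hvL]
        rw [eq_comm, List.count_eq_zero]
        intro hmem'
        have hb := hbound v hmem'
        have hnot : ¬ (0 < v ∧ v ≤ n) := fun hc => hvL ((hmem v).2 hc)
        omega
  have hpairX := pvFlatMap_pairwise (fun L => PySem.List.pyGetD (pvHisto b1 e) L 0)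
    (PySem.List.pyRange n 0 (-1)) (pvRangeDesc_pairwise n)
  beta_reduce at hpairX
  have hpairApp : ((PySem.List.pyRange n 0 (-1)).flatMap
        (fun L => List.replicate (PySem.List.pyGetD (pvHisto b1 e) L 0).toNat L)
      ++ List.replicate ((pvStripLast e).count 0) 0).Pairwise (· ≥ ·) := by
    rw [List.pairwise_append]
    refine ⟨hpairX, ?_, ?_⟩
    · rw [List.pairwise_replicate]
      right; exact le_refl 0
    · intro x hx y hy
      have hy0 : y = 0 := List.eq_of_mem_replicate hy
      obtain ⟨M, hM, hxM⟩ := List.mem_flatMap.1 hx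
      have hxM' : x = M := List.eq_of_mem_replicate hxM
      have := (hmem M).1 hM
      subst hxM'; subst hy0
      omega
  have hsorted : (PySem.List.sorted (pvStripLast e) (fun x => x) true).Pairwise (· ≥ ·) :=
    PySem.List.sorted_pairwise_rev (pvStripLast e) (fun x => x)
  have heq : PySem.List.sorted (pvStripLast e) (fun x => x) true
      = (PySem.List.pyRange n 0 (-1)).flatMap
          (fun L => List.replicate (PySem.List.pyGetD (pvHisto b1 e) L 0).toNat L)
        ++ List.replicate ((pvStripLast e).count 0) 0 :=
    List.Perm.eq_of_pairwise (fun a b _ _ hab hba => le_antisymm hba hab) hsorted hpairApp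
      ((PySem.List.sorted_perm _ _ _).trans hperm.symm)
  have hfold := pvFoldDesc (fun L => PySem.List.pyGetD (pvHisto b1 e) L 0)
    (PySem.List.pyRange n 0 (-1)) hcntnn 0 true
  beta_reduce at hfold
  rw [heq, ← (pvAlt_eq_sums _).1,
    pvAlt_append_zeros _ _ (fun x hx => List.eq_of_mem_replicate hx) true]
  rw [show ((0:Int), (0:Int)) = ((0:Int), if (true:Bool) then (0:Int) else (1:Int)) from rfl]
  rw [hfold, zero_add]

lemma pvMain (s : String) (h : s.toList ≠ []) :
    calculate_alice_score s = calculate_alice_score_alt s := by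
  obtain ⟨c0, rest, hs⟩ := List.exists_cons_of_ne_nil h
  have hfirst0 : (0:Int) ≤ (if c0 = '0' then 0 else 1) := by split <;> norm_num
  set first : Int := if c0 = '0' then 0 else 1 with hfirst
  set e : List Int := pvRunsAux first rest with he
  set n : Int := ((c0 :: rest).length : Int) with hn
  set b0 : List Int := List.replicate (n.toNat + 1) 0 with hb0
  have hb0len : b0.length = n.toNat + 1 := by simp [hb0]
  -- the A side reduces to the alternating even-index sum of sorted(stripLast e, reverse)
  have hA : calculate_alice_score s
      = pvA_evenSum (PySem.List.sorted (pvStripLast e) (fun x => x) true) := by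
    rw [calculate_alice_score, hs]
    rw [← pvA_poss_eq_strip rest first hfirst0]
  -- the B side: the scan builds the histogram of e over the all-zero base
  have hscan : (rest.foldl
      (fun (st : List Int × Int) c =>
        if c = '1' then (st.1, st.2 + 1)
        else (st.1.modify st.2.toNat (· + 1), 0)) (b0, first) |>.1.modify
          (rest.foldl
      (fun (st : List Int × Int) c =>
        if c = '1' then (st.1, st.2 + 1)
        else (st.1.modify st.2.toNat (· + 1), 0)) (b0, first) |>.2.toNat) (· + 1))
      = pvHisto b0 e := by
    rw [pvFold_eq_scan, pvScan_histo, he]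
  have hB : calculate_alice_score_alt s
      = ((PySem.List.pyRange n 0 (-1)).foldl
          (fun (ap : Int × Int) len =>
            (ap.1 + len * PySem.Int.floordiv (PySem.List.pyGetD (pvHisto b0 e) len 0 + 1 - ap.2) 2,
             PySem.Int.mod (ap.2 + PySem.List.pyGetD (pvHisto b0 e) len 0) 2)) ((0:Int), (0:Int))).1 := by
    rw [calculate_alice_score_alt]
    simp only [hs]
    rw [← hn, ← hfirst, ← hb0, hscan]
  have hzero : ∀ j : Nat, 0 < j → j < b0.length → b0.getD j 0 = 0 := by
    intro j _ hjlen
    rw [hb0, List.getD_replicate _ (by simpa [hb0] using hjlen)]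
  have hbound : ∀ v ∈ e, 0 ≤ v ∧ v ≤ n := by
    intro v hv
    have hb := pvRunsAux_bounds rest first hfirst0 v (by rwa [← he])
    have hf1 : first ≤ 1 := by rw [hfirst]; split <;> norm_num
    have hnval : n = (rest.length : Int) + 1 := by simp [hn]
    constructor
    · exact hb.1
    · omega
  rw [hA, hB]
  exact pvAssemble e b0 n hb0len hzero hbound

-- ===== VERDICT (by name: the statement is the Claim_ definition above) =====
theorem calculate_alice_score_spec : Claim_equal_calculate_alice_score := by
  intro s _ hpre
  unfold Spec_calculate_alice_score
  exact pvMain s hpre
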